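-- pv_equiv track=rewrite | github.com/Molochko1990/algorithms_and_complexity_analysis | lab_4/ex_1.py | max_wire_length
-- ===== SOURCE A (Python) =====
-- def max_wire_length(n, k, wires):
--     left, right = 1, max(wires)
--
--     def can_cut(length):
--         # считаем сколько кусков получилось при текущей длине
--         return sum(wire // length for wire in wires) >= k
--
--     result = 0
--     while left <= right:
--         mid = (left + right) // 2
--         if can_cut(mid):
--             result = mid
--             left = mid + 1
--         else:
--             right = mid - 1
--     return result
-- ===== SOURCE B (Python) =====
-- def max_wire_length(n, k, wires):
--     limit = max(wires)
--
--     def go(size, lo, best):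
--         # size candidates remain, starting at lo; best = last accepted length
--         if size == 0:
--             return best
--         half = (size - 1) // 2
--         mid = lo + half
--         if sum(w // mid for w in wires) < k:
--             return go(half, lo, best)
--         return go(size - 1 - half, mid + 1, mid)
--
--     return go(limit if limit > 0 else 0, 1, 0)
-- ===== Notes on version B (the rewrite author's own statement) =====
-- stated objective: alternative
-- what changed: Replaces A's iterative binary search over mutable (left, right, result) by a tail recursion whose state is the COUNT of remaining candidate lengths plus an offset (midpoint via Nat-style halving of the count) with the best-so-far carried as an accumulator and the piece count inlined with the inverted test; the bisection trajectory is preserved because a linear scan is not equivalent when wires may be negative.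
import Mathlib
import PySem

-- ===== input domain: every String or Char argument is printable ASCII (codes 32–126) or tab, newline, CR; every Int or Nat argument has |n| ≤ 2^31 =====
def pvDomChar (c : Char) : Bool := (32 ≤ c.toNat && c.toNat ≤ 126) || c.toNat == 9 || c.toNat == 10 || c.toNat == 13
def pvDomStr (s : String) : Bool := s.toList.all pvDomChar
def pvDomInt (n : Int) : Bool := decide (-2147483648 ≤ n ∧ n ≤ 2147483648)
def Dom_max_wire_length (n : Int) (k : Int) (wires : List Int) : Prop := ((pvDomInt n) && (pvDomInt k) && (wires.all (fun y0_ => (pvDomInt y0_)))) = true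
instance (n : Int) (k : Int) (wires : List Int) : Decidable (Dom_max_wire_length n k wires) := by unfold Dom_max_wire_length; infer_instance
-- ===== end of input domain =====

-- B rewrites A's while-loop bisection over mutable (left, right, result) as a tail
-- recursion over the interval represented as a candidate COUNT plus offset, with the
-- best-so-far carried as an accumulator (objective: alternative decomposition, same cost).

-- ===== PORT A =====
-- can_cut(length): sum(wire // length for wire in wires) >= k
def pvCanCut (k : Int) (wires : List Int) (length : Int) : Bool :=
  (wires.foldl (fun acc wire => acc + PySem.Int.floordiv wire length) 0) ≥ k

-- the while-loop of A: state (left, right, result)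
def pvLoopA (k : Int) (wires : List Int) (left right result : Int) : Int :=
  if _h : left ≤ right then
    let mid := PySem.Int.floordiv (left + right) 2
    if pvCanCut k wires mid then pvLoopA k wires (mid + 1) right mid
    else pvLoopA k wires left (mid - 1) result
  else result
termination_by (right - left + 1).toNat
decreasing_by
  · have := PySem.Int.floordiv_two_mid_bounds _h
    omega
  · have := PySem.Int.floordiv_two_mid_bounds _h
    omega

def max_wire_length (n : Int) (k : Int) (wires : List Int) : Int :=
  -- max(wires): ValueError on [] is excluded by Pre_; getD 0 is unreachable there
  pvLoopA k wires 1 ((PySem.List.max? wires (fun x => x)).getD 0) 0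

-- ===== PORT B =====
-- go(size, lo, best): size candidates remain starting at lo; best = last accepted length
def pvGoB (k : Int) (wires : List Int) : Nat → Int → Int → Int
  | 0, _, best => best
  | s + 1, lo, best =>
      let half := s / 2
      let mid := lo + (half : Int)
      if (wires.map (fun w => PySem.Int.floordiv w mid)).sum < k then
        pvGoB k wires half lo best
      else
        pvGoB k wires (s - half) (mid + 1) mid
termination_by s => s
decreasing_by all_goals omega

def max_wire_length_alt (n : Int) (k : Int) (wires : List Int) : Int :=
  let limit := (PySem.List.max? wires (fun x => x)).getD 0
  pvGoB k wires (if limit > 0 then limit.toNat else 0) 1 0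

-- ===== PRECONDITION & SPEC =====
-- Python's max(wires) raises ValueError on the empty list (in both A and B)
def Pre_max_wire_length (n : Int) (k : Int) (wires : List Int) : Prop := wires ≠ []
instance (n : Int) (k : Int) (wires : List Int) : Decidable (Pre_max_wire_length n k wires) := by unfold Pre_max_wire_length; infer_instance
def pvWitness_max_wire_length : Int × Int × List Int := (3, 4, [5, 7, 2])

def Spec_max_wire_length (n : Int) (k : Int) (wires : List Int) (out : Int) : Prop := out = max_wire_length_alt n k wires
instance (n : Int) (k : Int) (wires : List Int) (out : Int) : Decidable (Spec_max_wire_length n k wires out) := by unfold Spec_max_wire_length; infer_instance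

-- ===== CLAIM (what is proved, stated in full; the proofs are below) =====
def Claim_equal_max_wire_length : Prop := ∀ (n : Int) (k : Int) (wires : List Int), Dom_max_wire_length n k wires → Pre_max_wire_length n k wires → Spec_max_wire_length n k wires (max_wire_length n k wires)

-- ===== LEMMAS AND PROOFS =====

-- B's inlined piece count agrees with A's can_cut accumulator (generalized over acc)
theorem pvSum_aux (m : Int) (ws : List Int) : ∀ acc : Int,
    ws.foldl (fun a w => a + PySem.Int.floordiv w m) acc =
      acc + (ws.map (fun w => PySem.Int.floordiv w m)).sum := by
  induction ws with
  | nil => intro acc; simp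
  | cons w t iht =>
    intro acc
    simp only [List.foldl_cons, List.map_cons, List.sum_cons, iht]
    ring

theorem pvSum_eq (wires : List Int) (m : Int) :
    (wires.map (fun w => PySem.Int.floordiv w m)).sum =
      wires.foldl (fun acc wire => acc + PySem.Int.floordiv wire m) 0 := by
  rw [pvSum_aux]; ring

-- B's midpoint (offset + half of size-1, Nat division) is A's (lo+hi)//2
theorem pvMid_eq (lo hi : Int) (h : lo ≤ hi) :
    PySem.Int.floordiv (lo + hi) 2 = lo + (((hi - lo).toNat / 2 : Nat) : Int) := by
  rw [PySem.Int.floordiv_eq_ediv_of_pos (by omega)]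
  omega

-- Core invariant: A's loop on [lo, hi] with pending result r
-- equals B's recursion on (count of candidates, lo, r).
theorem pvLoopA_eq_goB (k : Int) (wires : List Int) :
    ∀ (s : Nat) (lo hi r : Int), s = (hi - lo + 1).toNat →
      pvLoopA k wires lo hi r = pvGoB k wires s lo r := by
  intro s
  induction s using Nat.strong_induction_on with
  | _ s ih =>
  intro lo hi r hs
  match s, hs with
  | 0, hs =>
    rw [pvLoopA, pvGoB]
    have : ¬ lo ≤ hi := by omega
    simp [this]
  | s + 1, hs =>
    have hle : lo ≤ hi := by omega
    rw [pvLoopA, pvGoB]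
    simp only [dif_pos hle]
    have hsd : ((hi - lo).toNat / 2 : Nat) = s / 2 := by omega
    have hmid : PySem.Int.floordiv (lo + hi) 2 = lo + ((s / 2 : Nat) : Int) := by
      rw [pvMid_eq lo hi hle, hsd]
    rw [hmid, pvSum_eq, pvCanCut]
    set half := (s / 2 : Nat) with hh
    by_cases hc : wires.foldl (fun acc wire => acc + PySem.Int.floordiv wire (lo + (half : Int))) 0 ≥ k
    · have hc' : ¬ wires.foldl (fun acc wire => acc + PySem.Int.floordiv wire (lo + (half : Int))) 0 < k := by omega
      simp only [hc, decide_true, if_true, hc', if_false]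
      exact ih (s - half) (by omega) (lo + (half : Int) + 1) hi (lo + (half : Int)) (by omega)
    · have hc' : wires.foldl (fun acc wire => acc + PySem.Int.floordiv wire (lo + (half : Int))) 0 < k := by omega
      simp only [hc, decide_false, if_false, hc', if_true, Bool.false_eq_true]
      exact ih half (by omega) lo (lo + (half : Int) - 1) r (by omega)

-- ===== VERDICT (by name: the statement is the Claim_ definition above) =====
theorem max_wire_length_spec : Claim_equal_max_wire_length := by
  intro n k wires _ _
  unfold Spec_max_wire_length max_wire_length max_wire_length_alt
  set limit := (PySem.List.max? wires (fun x => x)).getD 0 with hl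
  exact pvLoopA_eq_goB k wires _ 1 limit 0 (by split <;> omega)
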